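-- pv_equiv track=rewrite | github.com/bcongdon/advent_of_code_2020 | Day10-19/11.py | iterate1
-- ===== SOURCE A (Python) =====
-- from itertools import product
--
-- def iterate1(grid):
--     n, m = len(grid), len(grid[0])
--     next_grid = [['' for _ in range(m)] for _ in range(n)]
--     changed = False
--     for (x, y) in product(range(n), range(m)):
--         neighbors = 0
--         for (nx, ny) in [(x - 1, y), (x - 1, y - 1), (x - 1, y + 1), (x + 1, y), (x + 1, y - 1), (x + 1, y + 1), (x, y - 1), (x, y + 1)]:
--             if (0 <= nx < n) and (0 <= ny < m) and grid[nx][ny] == '#':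
--                 neighbors += 1
--         state = grid[x][y]
--         if state == 'L' and neighbors == 0:
--             state = '#'
--             changed = True
--         elif state == '#' and neighbors >= 4:
--             state = 'L'
--             changed = True
--         next_grid[x][y] = state
--     return next_grid, changed
-- ===== SOURCE B (Python) =====
-- def iterate1(grid):
--     n, m = len(grid), len(grid[0])
--     # separable neighbor counting: h[x][y] = number of '#' among grid[x][y-1..y+1] (in bounds),
--     # so the 8-neighbor count is the 3-row vertical sum of h minus the center cell itself.
--     h = [[sum(1 for t in (y - 1, y, y + 1) if 0 <= t < m and grid[x][t] == '#')
--           for y in range(m)] for x in range(n)]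
--
--     def cell(x, y):
--         total = h[x][y] + (h[x - 1][y] if x > 0 else 0) + (h[x + 1][y] if x < n - 1 else 0)
--         state = grid[x][y]
--         neighbors = total - (1 if state == '#' else 0)
--         if state == 'L' and neighbors == 0:
--             return '#'
--         if state == '#' and neighbors >= 4:
--             return 'L'
--         return state
--
--     next_grid = [[cell(x, y) for y in range(m)] for x in range(n)]
--     changed = any(next_grid[x][y] != grid[x][y] for x in range(n) for y in range(m))
--     return next_grid, changed
-- ===== Notes on version B (the rewrite author's own statement) =====
-- stated objective: alternative
-- what changed: B replaces A's per-cell scan of the 8 explicit neighbour offsets and its preallocate-and-assign grid with a separable two-pass scheme: a precomputed per-row horizontal 3-window '#' table whose 3-row vertical sum minus the centre gives each neighbour count, comprehension-built output, and 'changed' derived by comparing the new grid with the old instead of a mutated flag.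
import Mathlib
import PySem

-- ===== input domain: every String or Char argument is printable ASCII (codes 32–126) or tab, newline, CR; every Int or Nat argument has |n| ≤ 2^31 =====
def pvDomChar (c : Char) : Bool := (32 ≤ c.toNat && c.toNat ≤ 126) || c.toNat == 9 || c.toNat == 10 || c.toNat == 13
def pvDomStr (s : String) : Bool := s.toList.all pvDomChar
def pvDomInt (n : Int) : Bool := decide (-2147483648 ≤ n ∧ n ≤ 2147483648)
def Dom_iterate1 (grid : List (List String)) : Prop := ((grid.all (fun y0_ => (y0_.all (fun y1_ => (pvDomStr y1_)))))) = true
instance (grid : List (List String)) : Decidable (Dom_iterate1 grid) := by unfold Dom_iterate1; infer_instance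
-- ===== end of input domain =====

-- B computes neighbour counts separably (horizontal 3-window table + vertical 3-row sum minus centre)
-- and derives `changed` by comparing grids, instead of A's 8-offset scan with a mutated flag: a
-- different decomposition of the same O(n*m) step (not claimed faster).


-- ===== PORT A =====
-- the inner 8-offset neighbour loop of A; grid[nx][ny] is read only under the bounds guard and is
-- in range under Pre_, so the total pyGetD is exact there
def iterate1Neigh (grid : List (List String)) (n m x y : Int) : Int :=
  [(x-1,y),(x-1,y-1),(x-1,y+1),(x+1,y),(x+1,y-1),(x+1,y+1),(x,y-1),(x,y+1)].foldl
    (fun nb p =>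
      if 0 ≤ p.1 ∧ p.1 < n ∧ 0 ≤ p.2 ∧ p.2 < m ∧
          PySem.List.pyGetD (PySem.List.pyGetD grid p.1 []) p.2 "" = "#" then nb + 1 else nb) 0

def iterate1 (grid : List (List String)) : List (List String) × Bool :=
  let n : Int := grid.length
  let m : Int := ((PySem.List.pyGetD grid 0 []).length : Int)  -- grid[0]: IndexError on [], excluded by Pre_
  let next0 : List (List String) :=
    (PySem.List.pyRange 0 n 1).map (fun _ => (PySem.List.pyRange 0 m 1).map (fun _ => ""))
  -- for (x, y) in product(range(n), range(m)): the same row-major nested iteration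
  (PySem.List.pyRange 0 n 1).foldl (fun acc x =>
    (PySem.List.pyRange 0 m 1).foldl (fun (acc : List (List String) × Bool) y =>
      let neighbors := iterate1Neigh grid n m x y
      let state := PySem.List.pyGetD (PySem.List.pyGetD grid x []) y ""  -- grid[x][y]: in range under Pre_
      let sc : String × Bool :=
        if state = "L" ∧ neighbors = 0 then ("#", true)
        else if state = "#" ∧ 4 ≤ neighbors then ("L", true)
        else (state, acc.2)
      (PySem.List.pySetD acc.1 x (PySem.List.pySetD (PySem.List.pyGetD acc.1 x []) y sc.1), sc.2))
      acc)
    (next0, false)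

-- ===== PORT B =====
-- Source B's table h: h[x][y] = number of '#' among grid[x][y-1..y+1] that are in bounds
def iterate1AltH (grid : List (List String)) (n m : Int) : List (List Int) :=
  (PySem.List.pyRange 0 n 1).map (fun x =>
    (PySem.List.pyRange 0 m 1).map (fun y =>
      (([y-1, y, y+1].countP (fun t =>
        decide (0 ≤ t ∧ t < m ∧ PySem.List.pyGetD (PySem.List.pyGetD grid x []) t "" = "#"))) : Int)))

-- Source B's `cell`: vertical 3-row sum of h minus the centre, then the transition rules
def iterate1AltCell (grid : List (List String)) (n m : Int) (h : List (List Int)) (x y : Int) : String :=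
  let total := PySem.List.pyGetD (PySem.List.pyGetD h x []) y 0
    + (if 0 < x then PySem.List.pyGetD (PySem.List.pyGetD h (x-1) []) y 0 else 0)
    + (if x < n - 1 then PySem.List.pyGetD (PySem.List.pyGetD h (x+1) []) y 0 else 0)
  let state := PySem.List.pyGetD (PySem.List.pyGetD grid x []) y ""
  let neighbors := total - (if state = "#" then 1 else 0)
  if state = "L" ∧ neighbors = 0 then "#"
  else if state = "#" ∧ 4 ≤ neighbors then "L"
  else state

def iterate1_alt (grid : List (List String)) : List (List String) × Bool :=
  let n : Int := grid.length
  let m : Int := ((PySem.List.pyGetD grid 0 []).length : Int)  -- grid[0]: IndexError on [], excluded by Pre_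
  let h := iterate1AltH grid n m
  let next := (PySem.List.pyRange 0 n 1).map (fun x =>
    (PySem.List.pyRange 0 m 1).map (fun y => iterate1AltCell grid n m h x y))
  let changed := (PySem.List.pyRange 0 n 1).any (fun x =>
    (PySem.List.pyRange 0 m 1).any (fun y =>
      PySem.List.pyGetD (PySem.List.pyGetD next x []) y "" != PySem.List.pyGetD (PySem.List.pyGetD grid x []) y ""))
  (next, changed)

-- ===== PRECONDITION & SPEC =====
-- Pre_ excludes exactly the inputs where the Python A raises IndexError: the empty grid (grid[0])
-- and grids where some row is shorter than the first row (A reads grid[x][y] for every y < len(grid[0])).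
def Pre_iterate1 (grid : List (List String)) : Prop :=
  grid ≠ [] ∧ ∀ row ∈ grid, (grid.headD []).length ≤ row.length
instance (grid : List (List String)) : Decidable (Pre_iterate1 grid) := by unfold Pre_iterate1; infer_instance

def pvWitness_iterate1 : List (List String) := [["L", "#"], [".", "L"]]

def Spec_iterate1 (grid : List (List String)) (out : List (List String) × Bool) : Prop := out = iterate1_alt grid
instance (grid : List (List String)) (out : List (List String) × Bool) : Decidable (Spec_iterate1 grid out) := by unfold Spec_iterate1; infer_instance

-- ===== CLAIM (what is proved, stated in full; the proofs are below) =====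
def Claim_equal_iterate1 : Prop := ∀ (grid : List (List String)), Dom_iterate1 grid → Pre_iterate1 grid → Spec_iterate1 grid (iterate1 grid)

-- ===== LEMMAS AND PROOFS =====

-- 0/1 indicator of A's guarded neighbour test at a point
def pvOcc (grid : List (List String)) (n m : Int) (p : Int × Int) : Int :=
  if 0 ≤ p.1 ∧ p.1 < n ∧ 0 ≤ p.2 ∧ p.2 < m ∧
      PySem.List.pyGetD (PySem.List.pyGetD grid p.1 []) p.2 "" = "#" then 1 else 0

-- the value A writes into cell (x, y)
def pvCellA (grid : List (List String)) (n m x y : Int) : String :=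
  let state := PySem.List.pyGetD (PySem.List.pyGetD grid x []) y ""
  if state = "L" ∧ iterate1Neigh grid n m x y = 0 then "#"
  else if state = "#" ∧ 4 ≤ iterate1Neigh grid n m x y then "L"
  else state

-- whether cell (x, y) changes
def pvChA (grid : List (List String)) (n m x y : Int) : Bool :=
  pvCellA grid n m x y != PySem.List.pyGetD (PySem.List.pyGetD grid x []) y ""

theorem pv_neigh_eq (grid : List (List String)) (n m x y : Int) :
    iterate1Neigh grid n m x y =
      pvOcc grid n m (x-1,y) + pvOcc grid n m (x-1,y-1) + pvOcc grid n m (x-1,y+1) +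
      pvOcc grid n m (x+1,y) + pvOcc grid n m (x+1,y-1) + pvOcc grid n m (x+1,y+1) +
      pvOcc grid n m (x,y-1) + pvOcc grid n m (x,y+1) := by
  have h : ∀ (acc : Int), ∀ p ∈ [(x-1,y),(x-1,y-1),(x-1,y+1),(x+1,y),(x+1,y-1),(x+1,y+1),(x,y-1),(x,y+1)],
      (if 0 ≤ p.1 ∧ p.1 < n ∧ 0 ≤ p.2 ∧ p.2 < m ∧
          PySem.List.pyGetD (PySem.List.pyGetD grid p.1 []) p.2 "" = "#" then acc + 1 else acc)
        = acc + pvOcc grid n m p := by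
    intro acc p _
    simp only [pvOcc]
    split <;> omega
  rw [iterate1Neigh, PySem.List.foldl_congr_mem _ _ _ _ h, PySem.List.foldl_add]
  simp [List.sum_cons]
  ring

theorem pv_h_eq (grid : List (List String)) (n m x y : Int)
    (hx0 : 0 ≤ x) (hxn : x < n) (hy0 : 0 ≤ y) (hym : y < m) :
    PySem.List.pyGetD (PySem.List.pyGetD (iterate1AltH grid n m) x []) y 0 =
      pvOcc grid n m (x,y-1) + pvOcc grid n m (x,y) + pvOcc grid n m (x,y+1) := by
  rw [iterate1AltH, PySem.List.pyGetD_map_pyRange_of_nonneg _ _ _ _ hx0 hxn,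
      PySem.List.pyGetD_map_pyRange_of_nonneg _ _ _ _ hy0 hym]
  simp only [List.countP_cons, List.countP_nil, pvOcc, hx0, hxn]
  push_cast
  split_ifs <;> simp_all <;> omega

theorem pv_cell_eq (grid : List (List String)) (n m x y : Int)
    (hx0 : 0 ≤ x) (hxn : x < n) (hy0 : 0 ≤ y) (hym : y < m) :
    iterate1AltCell grid n m (iterate1AltH grid n m) x y = pvCellA grid n m x y := by
  have hocc : pvOcc grid n m (x, y) =
      (if PySem.List.pyGetD (PySem.List.pyGetD grid x []) y "" = "#" then (1:Int) else 0) := by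
    simp [pvOcc, hx0, hxn, hy0, hym]
  have key : PySem.List.pyGetD (PySem.List.pyGetD (iterate1AltH grid n m) x []) y 0
    + (if 0 < x then PySem.List.pyGetD (PySem.List.pyGetD (iterate1AltH grid n m) (x-1) []) y 0 else 0)
    + (if x < n - 1 then PySem.List.pyGetD (PySem.List.pyGetD (iterate1AltH grid n m) (x+1) []) y 0 else 0)
    - (if PySem.List.pyGetD (PySem.List.pyGetD grid x []) y "" = "#" then (1:Int) else 0)
      = iterate1Neigh grid n m x y := by
    rw [pv_neigh_eq, pv_h_eq grid n m x y hx0 hxn hy0 hym, ← hocc]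
    by_cases h1 : 0 < x <;> by_cases h2 : x < n - 1 <;> simp only [h1, h2, if_true, if_false, if_pos, if_neg]
    · rw [pv_h_eq grid n m (x-1) y (by omega) (by omega) hy0 hym,
          pv_h_eq grid n m (x+1) y (by omega) (by omega) hy0 hym]
      ring
    · rw [pv_h_eq grid n m (x-1) y (by omega) (by omega) hy0 hym]
      have hz : ∀ t : Int, pvOcc grid n m (x+1, t) = 0 := by
        intro t; simp only [pvOcc]; rw [if_neg]; omega
      rw [hz, hz, hz]; ring
    · rw [pv_h_eq grid n m (x+1) y (by omega) (by omega) hy0 hym]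
      have hz : ∀ t : Int, pvOcc grid n m (x-1, t) = 0 := by
        intro t; simp only [pvOcc]; rw [if_neg]; omega
      rw [hz, hz, hz]; ring
    · have hz1 : ∀ t : Int, pvOcc grid n m (x+1, t) = 0 := by
        intro t; simp only [pvOcc]; rw [if_neg]; omega
      have hz2 : ∀ t : Int, pvOcc grid n m (x-1, t) = 0 := by
        intro t; simp only [pvOcc]; rw [if_neg]; omega
      rw [hz1, hz1, hz1, hz2, hz2, hz2]; ring
  rw [iterate1AltCell, pvCellA]
  simp only [← key]

theorem pv_step_eq (grid : List (List String)) (n m x y : Int) (acc : List (List String) × Bool) :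
    (PySem.List.pySetD acc.1 x
       (PySem.List.pySetD (PySem.List.pyGetD acc.1 x []) y
         (if PySem.List.pyGetD (PySem.List.pyGetD grid x []) y "" = "L" ∧ iterate1Neigh grid n m x y = 0 then (("#":String), true)
        else if PySem.List.pyGetD (PySem.List.pyGetD grid x []) y "" = "#" ∧ 4 ≤ iterate1Neigh grid n m x y then ("L", true)
        else (PySem.List.pyGetD (PySem.List.pyGetD grid x []) y "", acc.2)).1),
     (if PySem.List.pyGetD (PySem.List.pyGetD grid x []) y "" = "L" ∧ iterate1Neigh grid n m x y = 0 then (("#":String), true)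
        else if PySem.List.pyGetD (PySem.List.pyGetD grid x []) y "" = "#" ∧ 4 ≤ iterate1Neigh grid n m x y then ("L", true)
        else (PySem.List.pyGetD (PySem.List.pyGetD grid x []) y "", acc.2)).2)
    = (PySem.List.pySetD acc.1 x (PySem.List.pySetD (PySem.List.pyGetD acc.1 x []) y (pvCellA grid n m x y)),
       acc.2 || pvChA grid n m x y) := by
  simp only [pvChA, pvCellA]
  split_ifs with h1 h2 <;> simp_all

theorem pv_inner (grid : List (List String)) (n m : Int) (X : Nat) (x : Int) (hx : x = (X : Int)) :
    ∀ (j : Nat) (P Q : List (List String)) (r : List String) (c : Bool),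
      P.length = X → j ≤ r.length →
      (PySem.List.pyRange 0 (j : Int) 1).foldl
        (fun (acc : List (List String) × Bool) y =>
          (PySem.List.pySetD acc.1 x
             (PySem.List.pySetD (PySem.List.pyGetD acc.1 x []) y
               (if PySem.List.pyGetD (PySem.List.pyGetD grid x []) y "" = "L" ∧ iterate1Neigh grid n m x y = 0 then (("#":String), true)
                else if PySem.List.pyGetD (PySem.List.pyGetD grid x []) y "" = "#" ∧ 4 ≤ iterate1Neigh grid n m x y then ("L", true)
                else (PySem.List.pyGetD (PySem.List.pyGetD grid x []) y "", acc.2)).1),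
           (if PySem.List.pyGetD (PySem.List.pyGetD grid x []) y "" = "L" ∧ iterate1Neigh grid n m x y = 0 then (("#":String), true)
            else if PySem.List.pyGetD (PySem.List.pyGetD grid x []) y "" = "#" ∧ 4 ≤ iterate1Neigh grid n m x y then ("L", true)
            else (PySem.List.pyGetD (PySem.List.pyGetD grid x []) y "", acc.2)).2))
        (P ++ r :: Q, c)
      = (P ++ ((List.range j).map (fun (Y : Nat) => pvCellA grid n m x ((Y : Nat) : Int)) ++ r.drop j) :: Q,
         c || (List.range j).any (fun (Y : Nat) => pvChA grid n m x ((Y : Nat) : Int))) := by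
  intro j
  induction j with
  | zero =>
    intro P Q r c hP hr
    rw [PySem.List.pyRange_one_eq_nil (by omega)]
    simp
  | succ j ih =>
    intro P Q r c hP hr
    have hcast : ((j + 1 : Nat) : Int) = (j : Int) + 1 := by push_cast; ring
    rw [hcast, PySem.List.pyRange_one_succ_right (by positivity), List.foldl_append,
        ih P Q r c hP (by omega)]
    rw [List.foldl_cons, List.foldl_nil, pv_step_eq]
    have hjr : j < r.length := by omega
    have hlen : ((List.range j).map (fun (Y : Nat) => pvCellA grid n m x ((Y : Nat) : Int))).length = j := by simp
    have hget : PySem.List.pyGetD (P ++ ((List.range j).map (fun (Y : Nat) => pvCellA grid n m x ((Y : Nat) : Int)) ++ r.drop j) :: Q) x []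
        = (List.range j).map (fun (Y : Nat) => pvCellA grid n m x ((Y : Nat) : Int)) ++ r.drop j := by
      rw [hx, ← hP]
      rw [show ((P.length : Nat) : Int) = (P.length : Int) from rfl, PySem.List.pyGetD_natCast]
      simp [List.getD]
    have hmid : ∀ (A : List String) (b : String) (C : List String) (v : String),
        A.length = j → (A ++ b :: C).set j v = A ++ v :: C := by
      intro A b C v h
      subst h
      simp
    have hset1 : PySem.List.pySetD ((List.range j).map (fun (Y : Nat) => pvCellA grid n m x ((Y : Nat) : Int)) ++ r.drop j) ((j : Nat) : Int) (pvCellA grid n m x (j : Int))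
        = (List.range j).map (fun (Y : Nat) => pvCellA grid n m x ((Y : Nat) : Int)) ++ pvCellA grid n m x (j : Int) :: r.drop (j+1) := by
      rw [PySem.List.pySetD_natCast, List.drop_eq_getElem_cons hjr]
      exact hmid _ _ _ _ hlen
    have hset2 : ∀ v : List String, PySem.List.pySetD (P ++ ((List.range j).map (fun (Y : Nat) => pvCellA grid n m x ((Y : Nat) : Int)) ++ r.drop j) :: Q) x v
        = P ++ v :: Q := by
      intro v
      rw [hx, ← hP]
      rw [show ((P.length : Nat) : Int) = (P.length : Int) from rfl, PySem.List.pySetD_natCast]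
      simp
    dsimp only
    rw [hget, hset1, hset2]
    simp [List.range_succ, Bool.or_assoc]

theorem pv_outer (grid : List (List String)) (n m : Int) (M : Nat) (hm : m = (M : Int)) (N : Nat) :
    ∀ (k : Nat), k ≤ N →
      (PySem.List.pyRange 0 (k : Int) 1).foldl
        (fun acc x =>
          (PySem.List.pyRange 0 m 1).foldl
            (fun (acc : List (List String) × Bool) y =>
          (PySem.List.pySetD acc.1 x
             (PySem.List.pySetD (PySem.List.pyGetD acc.1 x []) y
               (if PySem.List.pyGetD (PySem.List.pyGetD grid x []) y "" = "L" ∧ iterate1Neigh grid n m x y = 0 then (("#":String), true)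
                else if PySem.List.pyGetD (PySem.List.pyGetD grid x []) y "" = "#" ∧ 4 ≤ iterate1Neigh grid n m x y then ("L", true)
                else (PySem.List.pyGetD (PySem.List.pyGetD grid x []) y "", acc.2)).1),
           (if PySem.List.pyGetD (PySem.List.pyGetD grid x []) y "" = "L" ∧ iterate1Neigh grid n m x y = 0 then (("#":String), true)
            else if PySem.List.pyGetD (PySem.List.pyGetD grid x []) y "" = "#" ∧ 4 ≤ iterate1Neigh grid n m x y then ("L", true)
            else (PySem.List.pyGetD (PySem.List.pyGetD grid x []) y "", acc.2)).2))
            acc)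
        (List.replicate N ((PySem.List.pyRange 0 m 1).map (fun _ => "")), false)
      = ((List.range k).map (fun (X : Nat) => (List.range M).map (fun (Y : Nat) => pvCellA grid n m ((X : Nat) : Int) ((Y : Nat) : Int)))
          ++ List.replicate (N - k) ((PySem.List.pyRange 0 m 1).map (fun _ => "")),
         (List.range k).any (fun (X : Nat) => (List.range M).any (fun (Y : Nat) => pvChA grid n m ((X : Nat) : Int) ((Y : Nat) : Int)))) := by
  subst hm
  intro k
  induction k with
  | zero =>
    intro _
    rw [show PySem.List.pyRange 0 ((0:Nat):Int) 1 = [] from PySem.List.pyRange_one_eq_nil (by omega)]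
    simp
  | succ k ih =>
    intro hk
    have hcast : ((k + 1 : Nat) : Int) = (k : Int) + 1 := by push_cast; ring
    rw [hcast]
    rw [PySem.List.pyRange_one_succ_right (by positivity)]
    rw [List.foldl_append]
    rw [ih (by omega)]
    rw [List.foldl_cons, List.foldl_nil]
    have hrepl : N - k = (N - (k+1)) + 1 := by omega
    rw [hrepl, List.replicate_succ]
    have hBlen : M ≤ ((PySem.List.pyRange 0 ((M : Nat) : Int) 1).map (fun _ => ("":String))).length := by
      rw [PySem.List.pyRange_zero_nat]; simp
    have hPlen : ((List.range k).map (fun (X : Nat) => (List.range M).map (fun (Y : Nat) => pvCellA grid n ((M : Nat) : Int) ((X : Nat) : Int) ((Y : Nat) : Int)))).length = k := by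
      simp
    rw [pv_inner grid n ((M : Nat) : Int) k (k : Int) rfl M
        ((List.range k).map (fun (X : Nat) => (List.range M).map (fun (Y : Nat) => pvCellA grid n ((M : Nat) : Int) ((X : Nat) : Int) ((Y : Nat) : Int))))
        (List.replicate (N - (k+1)) ((PySem.List.pyRange 0 ((M : Nat) : Int) 1).map (fun _ => "")))
        ((PySem.List.pyRange 0 ((M : Nat) : Int) 1).map (fun _ => ""))
        ((List.range k).any (fun (X : Nat) => (List.range M).any (fun (Y : Nat) => pvChA grid n ((M : Nat) : Int) ((X : Nat) : Int) ((Y : Nat) : Int))))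
        hPlen hBlen]
    have hdrop : ((PySem.List.pyRange 0 ((M : Nat) : Int) 1).map (fun _ => ("":String))).drop M = [] := by
      apply List.drop_of_length_le
      rw [PySem.List.pyRange_zero_nat]; simp
    rw [hdrop]
    simp [List.range_succ]

-- ===== VERDICT (by name: the statement is the Claim_ definition above) =====
theorem iterate1_spec : Claim_equal_iterate1 := by
  intro grid _ _
  unfold Spec_iterate1
  simp only [iterate1, iterate1_alt]
  have hinit : List.map (fun _ => List.map (fun _ => ("":String)) (PySem.List.pyRange 0 (((PySem.List.pyGetD grid 0 []).length : Nat) : Int))) (PySem.List.pyRange 0 ((grid.length : Nat) : Int))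
      = List.replicate grid.length (List.map (fun _ => ("":String)) (PySem.List.pyRange 0 (((PySem.List.pyGetD grid 0 []).length : Nat) : Int))) := by
    rw [PySem.List.pyRange_zero_nat grid.length]
    simp [Function.comp_def, List.map_const']
  rw [hinit]
  rw [pv_outer grid ((grid.length : Nat) : Int) (((PySem.List.pyGetD grid 0 []).length : Nat) : Int)
      (PySem.List.pyGetD grid 0 []).length rfl grid.length grid.length le_rfl]
  have hcellmap : List.map (fun x => List.map (fun y => iterate1AltCell grid ((grid.length : Nat) : Int) (((PySem.List.pyGetD grid 0 []).length : Nat) : Int) (iterate1AltH grid ((grid.length : Nat) : Int) (((PySem.List.pyGetD grid 0 []).length : Nat) : Int)) x y) (PySem.List.pyRange 0 (((PySem.List.pyGetD grid 0 []).length : Nat) : Int) 1)) (PySem.List.pyRange 0 ((grid.length : Nat) : Int) 1)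
      = List.map (fun (X : Nat) => List.map (fun (Y : Nat) => pvCellA grid ((grid.length : Nat) : Int) (((PySem.List.pyGetD grid 0 []).length : Nat) : Int) ((X : Nat) : Int) ((Y : Nat) : Int)) (List.range (PySem.List.pyGetD grid 0 []).length)) (List.range grid.length) := by
    rw [PySem.List.pyRange_zero_nat grid.length, List.map_map]
    apply List.map_congr_left
    intro X hX
    simp only [Function.comp_def]
    rw [PySem.List.pyRange_zero_nat, List.map_map]
    apply List.map_congr_left
    intro Y hY
    simp only [Function.comp_def]
    exact pv_cell_eq grid _ _ (X : Int) (Y : Int) (by positivity)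
      (by exact_mod_cast List.mem_range.mp hX) (by positivity)
      (by exact_mod_cast List.mem_range.mp hY)
  rw [hcellmap]
  simp only [Prod.mk.injEq]
  refine ⟨by simp, ?_⟩
  refine Eq.symm ?_
  rw [PySem.List.pyRange_zero_nat grid.length, List.any_map]
  apply PySem.List.any_congr_mem
  intro X hX
  simp only [Function.comp_def]
  rw [PySem.List.pyGetD_natCast, PySem.List.getD_map_range _ _ _ _ (List.mem_range.mp hX)]
  rw [PySem.List.pyRange_zero_nat, List.any_map]
  apply PySem.List.any_congr_mem
  intro Y hY
  simp only [Function.comp_def]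
  rw [PySem.List.pyGetD_natCast, PySem.List.getD_map_range _ _ _ _ (List.mem_range.mp hY)]
  rw [pvChA]
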